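-- pv_equiv track=rewrite | github.com/mohammedaljader/Full_Stack_Projects | CPP-Project-group1/cpp/pipeline/dags/FindAndPrepare.py | findMachineID
-- ===== SOURCE A (Python) =====
-- def findMachineID(subdir, rootdir):
--     # Remove root dir from string
--     withoutroot = subdir.replace(rootdir, "")
--     output = ""
--     counter = 0
--     # Go through each character
--     for x in range(0, len(withoutroot)):
--         if counter < 2:
--             # Check for backslash and iterate counter to get first dir
--             if withoutroot[x] == "/":
--                 counter = counter + 1
--             else:
--                 output = output + withoutroot[x]
--     return output
-- ===== SOURCE B (Python) =====
-- def findMachineID(subdir, rootdir):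
--     withoutroot = subdir.replace(rootdir, "")
--     return "".join(withoutroot.split("/")[:2])
-- ===== Notes on version B (the rewrite author's own statement) =====
-- stated objective: simpler
-- what changed: Replaces the character-by-character scan with a slash counter by tokenizing the string with split('/'), slicing off the first two segments and joining them.
import Mathlib
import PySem

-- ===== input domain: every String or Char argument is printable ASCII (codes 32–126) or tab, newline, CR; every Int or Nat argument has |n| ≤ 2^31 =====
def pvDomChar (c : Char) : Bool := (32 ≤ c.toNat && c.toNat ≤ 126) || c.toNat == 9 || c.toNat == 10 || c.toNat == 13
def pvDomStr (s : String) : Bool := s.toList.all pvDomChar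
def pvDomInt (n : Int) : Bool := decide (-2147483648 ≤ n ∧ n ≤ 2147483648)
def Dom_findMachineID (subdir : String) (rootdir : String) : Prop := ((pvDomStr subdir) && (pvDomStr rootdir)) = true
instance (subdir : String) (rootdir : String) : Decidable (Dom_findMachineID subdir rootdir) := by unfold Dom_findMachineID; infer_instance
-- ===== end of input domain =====

-- B replaces A's character loop with a slash counter by split('/') / take 2 / join (objective: simpler).

-- ===== PORT A =====
-- A's loop over range(0, len(withoutroot)) indexing withoutroot[x]; the output string is
-- carried as its character list (PySem string ops are defined on List Char) and packed
-- with String.ofList at the end; the index is always in range, so pyGetD's default is unreachable.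
def findMachineID (subdir : String) (rootdir : String) : String :=
  let withoutroot := PySem.Str.replace subdir rootdir ""
  let w := withoutroot.toList
  let st := (PySem.List.pyRange 0 (PySem.Str.len withoutroot) 1).foldl
    (fun (st : List Char × Int) x =>
      if st.2 < 2 then
        if PySem.List.pyGetD w x ' ' = '/' then (st.1, st.2 + 1)
        else (st.1 ++ [PySem.List.pyGetD w x ' '], st.2)
      else st)
    ([], 0)
  String.ofList st.1

-- ===== PORT B =====
def findMachineID_alt (subdir : String) (rootdir : String) : String :=
  let withoutroot := PySem.Str.replace subdir rootdir ""
  String.ofList (PySem.Chars.join []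
    (PySem.List.slice (PySem.Chars.splitOn withoutroot.toList ['/']) none (some 2)))

-- ===== PRECONDITION & SPEC =====
def Spec_findMachineID (subdir : String) (rootdir : String) (out : String) : Prop := out = findMachineID_alt subdir rootdir
instance (subdir : String) (rootdir : String) (out : String) : Decidable (Spec_findMachineID subdir rootdir out) := by unfold Spec_findMachineID; infer_instance

-- ===== CLAIM (what is proved, stated in full; the proofs are below) =====
def Claim_equal_findMachineID : Prop := ∀ (subdir : String) (rootdir : String), Dom_findMachineID subdir rootdir → Spec_findMachineID subdir rootdir (findMachineID subdir rootdir)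

-- ===== LEMMAS AND PROOFS =====

-- joining with the empty separator is flattening
theorem pv_join_empty (ps : List (List Char)) : PySem.Chars.join [] ps = ps.flatten := by
  simp only [PySem.Chars.join, List.intercalate]
  induction ps with
  | nil => rfl
  | cons h t ih =>
    cases t with
    | nil => simp
    | cons h' t' => simpa [List.intersperse] using ih

-- PySem's fueled splitOn with a single-character separator is Mathlib's List.splitOn
theorem pv_splitOn_go (fuel : Nat) (l cur : List Char) (acc : List (List Char))
    (h : l.length < fuel) :
    PySem.Chars.splitOn.go ['/'] fuel l cur acc
      = acc.reverse ++ List.modifyHead (cur.reverse ++ ·) (l.splitOn '/') := by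
  induction fuel generalizing l cur acc with
  | zero => omega
  | succ k ih =>
    cases l with
    | nil =>
      simp [PySem.Chars.splitOn.go, List.splitOn, List.splitOnP_nil]
    | cons c rest =>
      simp only [PySem.Chars.splitOn.go]
      by_cases hc : c = '/'
      · subst hc
        rw [if_pos (by simp [List.isPrefixOf])]
        show PySem.Chars.splitOn.go ['/'] k rest [] (cur.reverse :: acc) = _
        rw [ih rest [] (cur.reverse :: acc) (by simpa using Nat.lt_of_succ_lt_succ h)]
        simp only [List.splitOn, List.splitOnP_cons, beq_self_eq_true, if_pos]
        cases hs : rest.splitOnP (· == '/') with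
        | nil => exact absurd hs (List.splitOnP_ne_nil _ _)
        | cons a b => simp [List.modifyHead]
      · rw [if_neg (by simp [List.isPrefixOf]; exact fun e => hc e.symm)]
        rw [ih rest (c :: cur) acc (by simpa using Nat.lt_of_succ_lt_succ h)]
        simp only [List.splitOn, List.splitOnP_cons, beq_iff_eq]
        rw [if_neg hc]
        cases hs : rest.splitOnP (· == '/') with
        | nil => exact absurd hs (List.splitOnP_ne_nil _ _)
        | cons a b => simp [List.modifyHead]

theorem pv_splitOn_eq (l : List Char) :
    PySem.Chars.splitOn l ['/'] = l.splitOn '/' := by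
  show PySem.Chars.splitOn.go ['/'] (l.length + 1) l [] [] = _
  rw [pv_splitOn_go (l.length + 1) l [] [] (by omega)]
  cases List.splitOn '/' l <;> simp

-- once the counter has reached 2, A's fold no longer changes its state
theorem pv_fold_stuck (l : List Char) (out : List Char) (ctr : Int) (h2 : ¬ ctr < 2) :
    l.foldl
      (fun (st : List Char × Int) c =>
        if st.2 < 2 then
          if c = '/' then (st.1, st.2 + 1) else (st.1 ++ [c], st.2)
        else st)
      (out, ctr) = (out, ctr) := by
  induction l with
  | nil => rfl
  | cons d t iht => rw [List.foldl_cons, if_neg h2]; exact iht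

-- the A-side fold with the slash counter computes the flatten of the first (2 - ctr) segments
theorem pv_fold_spec (l : List Char) (out : List Char) (ctr : Int) (h0 : 0 ≤ ctr) :
    (l.foldl
      (fun (st : List Char × Int) c =>
        if st.2 < 2 then
          if c = '/' then (st.1, st.2 + 1) else (st.1 ++ [c], st.2)
        else st)
      (out, ctr)).1
    = out ++ ((l.splitOn '/').take (2 - ctr).toNat).flatten := by
  induction l generalizing out ctr with
  | nil =>
    by_cases h2 : ctr < 2
    · have : (2 - ctr).toNat = 1 ∨ (2 - ctr).toNat = 2 := by omega
      rcases this with h | h <;> simp [List.splitOn, List.splitOnP_nil, h]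
    · have : (2 - ctr).toNat = 0 := by omega
      simp [this]
  | cons c rest ih =>
    by_cases h2 : ctr < 2
    · by_cases hc : c = '/'
      · subst hc
        rw [List.foldl_cons, if_pos h2, if_pos rfl]
        rw [ih out (ctr + 1) (by omega)]
        simp only [List.splitOn, List.splitOnP_cons, beq_self_eq_true, if_pos]
        have hn : (2 - ctr).toNat = (2 - (ctr + 1)).toNat + 1 := by omega
        rw [hn]
        simp
      · simp only [List.foldl_cons, if_pos h2, if_neg hc]
        rw [ih (out ++ [c]) ctr h0]
        simp only [List.splitOn, List.splitOnP_cons, beq_iff_eq, if_neg hc]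
        cases hs : rest.splitOnP (· == '/') with
        | nil => exact absurd hs (List.splitOnP_ne_nil _ _)
        | cons a b =>
          have hn : ∃ k, (2 - ctr).toNat = k + 1 := ⟨(1 - ctr).toNat, by omega⟩
          obtain ⟨k, hk⟩ := hn
          have hk' : (2 - ctr).toNat - 1 = k := by omega
          simp [List.modifyHead, hk]
    · -- counter already ≥ 2: the fold never changes the state
      have hz : (2 - ctr).toNat = 0 := by omega
      rw [List.foldl_cons, if_neg h2, pv_fold_stuck rest out ctr h2]
      simp [hz]

-- ===== VERDICT (by name: the statement is the Claim_ definition above) =====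
theorem findMachineID_spec : Claim_equal_findMachineID := by
  intro subdir rootdir _
  unfold Spec_findMachineID
  dsimp only [findMachineID, findMachineID_alt]
  set w := (PySem.Str.replace subdir rootdir "").toList with hw
  have hlen : PySem.Str.len (PySem.Str.replace subdir rootdir "") = PySem.List.len w := by
    simp [PySem.Str.len, PySem.List.len, hw]
  rw [hlen]
  rw [PySem.List.foldl_pyRange_pyGetD w ' '
    (fun (st : List Char × Int) c =>
      if st.2 < 2 then
        if c = '/' then (st.1, st.2 + 1) else (st.1 ++ [c], st.2)
      else st)
    ([], 0) (le_refl 0)]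
  simp only [Int.toNat_zero, List.drop_zero]
  rw [pv_fold_spec w [] 0 (le_refl 0)]
  rw [pv_join_empty, pv_splitOn_eq]
  rw [show PySem.List.slice (List.splitOn '/' w) none (some 2) = (List.splitOn '/' w).take (2:Int).toNat from PySem.List.slice_to _ (by omega)]
  simp
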